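-- pv_equiv track=rewrite | github.com/bss-aero/cubesat-ttc-utils | plot.py | scale_time
-- ===== SOURCE A (Python) =====
-- MAX_SCALED_AXIS = 3
--
-- def scale_time(interval):
--     scales = {
--         's': 1,
--         'min': 60,
--         'h': 3600,
--         'd': 86400,
--     }
--     result = (1, 's')
--     for label, scale in scales.items():
--         if interval <= scale * MAX_SCALED_AXIS:
--             break
--         result = (scale, label)
--     return result
-- ===== SOURCE B (Python) =====
-- def scale_time(interval):
--     # Direct threshold chain: each cutoff is 3x the next larger scale.
--     if interval <= 180:
--         return (1, 's')
--     elif interval <= 10800: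
--         return (60, 'min')
--     elif interval <= 259200:
--         return (3600, 'h')
--     else:
--         return (86400, 'd')
-- ===== Notes on version B (the rewrite author's own statement) =====
-- stated objective: simpler
-- what changed: Replaces the dict-building loop with break/accumulator by a direct if/elif chain over precomputed combined thresholds (180, 10800, 259200).
import Mathlib
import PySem

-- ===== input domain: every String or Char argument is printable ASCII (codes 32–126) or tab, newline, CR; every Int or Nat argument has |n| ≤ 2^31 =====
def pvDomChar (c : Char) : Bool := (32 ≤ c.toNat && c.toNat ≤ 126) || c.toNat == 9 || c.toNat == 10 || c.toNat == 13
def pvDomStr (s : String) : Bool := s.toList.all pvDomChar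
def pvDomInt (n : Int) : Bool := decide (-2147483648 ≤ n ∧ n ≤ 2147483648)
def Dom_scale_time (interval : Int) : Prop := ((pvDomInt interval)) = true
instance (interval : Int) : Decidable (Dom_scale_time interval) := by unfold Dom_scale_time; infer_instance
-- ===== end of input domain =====

-- B replaces A's dict-and-loop (break on interval ≤ scale*3, return previous entry) by a
-- direct if/elif chain over the precomputed combined thresholds 180/10800/259200 (simpler).

-- ===== PORT A =====
def MAX_SCALED_AXIS : Int := 3

-- the for-loop over scales.items() with break, carrying the accumulator `result`
def scale_time_loop (interval : Int) (items : List (String × Int)) (result : Int × String) : Int × String :=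
  match items with
  | [] => result
  | (label, scale) :: rest =>
    if interval ≤ scale * MAX_SCALED_AXIS then result
    else scale_time_loop interval rest (scale, label)

def scale_time (interval : Int) : Int × String :=
  let scales : PySem.Dict String Int :=
    ((((PySem.Dict.empty).insert "s" 1).insert "min" 60).insert "h" 3600).insert "d" 86400
  scale_time_loop interval scales.items (1, "s")

-- ===== PORT B =====
def scale_time_alt (interval : Int) : Int × String :=
  if interval ≤ 180 then (1, "s")
  else if interval ≤ 10800 then (60, "min")
  else if interval ≤ 259200 then (3600, "h")
  else (86400, "d")

-- ===== PRECONDITION & SPEC =====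
def Spec_scale_time (interval : Int) (out : Int × String) : Prop := out = scale_time_alt interval
instance (interval : Int) (out : Int × String) : Decidable (Spec_scale_time interval out) := by unfold Spec_scale_time; infer_instance

-- ===== CLAIM =====
def Claim_equal_scale_time : Prop := ∀ (interval : Int), Dom_scale_time interval → Spec_scale_time interval (scale_time interval)

-- ===== LEMMAS AND PROOFS =====

-- ===== VERDICT =====
theorem scale_time_spec : Claim_equal_scale_time := by
  intro interval _
  show scale_time interval = scale_time_alt interval
  have hitems : ((((((PySem.Dict.empty).insert "s" (1 : Int)).insert "min" 60).insert
      "h" 3600).insert "d" 86400) : PySem.Dict String Int).items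
      = [("s", 1), ("min", 60), ("h", 3600), ("d", 86400)] := by decide
  rw [scale_time, hitems]
  simp only [scale_time_loop, scale_time_alt, MAX_SCALED_AXIS]
  norm_num
  split_ifs <;> first | rfl | omega
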